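-- pv_equiv track=rewrite | github.com/tuhiniris/Competitive-Code-Snippets | test.py | minCostToMakeElementEqual
-- ===== SOURCE A (Python) =====
-- def computeCost(arr, N, X):
-- 	cost = 0
-- 	for i in range(N):
-- 		cost += abs(arr[i] - X)
-- 	return cost
--
-- def minCostToMakeElementEqual(arr, N):
-- 	low = high = arr[0]
-- 	for i in range(N):
-- 		if (low > arr[i]): low = arr[i]
-- 		if (high < arr[i]): high = arr[i]
-- 	while ((high - low) > 2):
-- 		mid1 = low + (high - low) // 3
-- 		mid2 = high - (high - low) // 3
--
-- 		cost1 = computeCost(arr, N, mid1)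
-- 		cost2 = computeCost(arr, N, mid2)
-- 		if (cost1 < cost2):
-- 			high = mid2
-- 		else:
-- 			low = mid1
-- 	return computeCost(arr, N, (low + high) // 2)
-- ===== SOURCE B (Python) =====
-- def minCostToMakeElementEqual(arr, N):
-- 	# Same ternary search over the value range as the original, but each cost
-- 	# query is O(log N) via a sorted copy + prefix sums instead of an O(N) scan.
-- 	if N <= 0:
-- 		return 0
-- 	xs = sorted(arr[:N])
-- 	pref = [0]
-- 	run = 0
-- 	for v in xs:
-- 		run += v
-- 		pref.append(run)
-- 	total = pref[N]
--
-- 	def cost(X):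
-- 		lo, hi = 0, N
-- 		while lo < hi:
-- 			m = (lo + hi) // 2
-- 			if xs[m] < X:
-- 				lo = m + 1
-- 			else:
-- 				hi = m
-- 		return X * (2 * lo - N) + total - 2 * pref[lo]
--
-- 	low, high = xs[0], xs[-1]
-- 	while high - low > 2:
-- 		mid1 = low + (high - low) // 3
-- 		mid2 = high - (high - low) // 3
-- 		c1 = cost(mid1)
-- 		c2 = cost(mid2)
-- 		if c1 < c2:
-- 			high = mid2
-- 		else:
-- 			low = mid1
-- 	return cost((low + high) // 2)
-- ===== Notes on version B (the rewrite author's own statement) =====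
-- stated objective: faster
-- what changed: The outer ternary search over the value range is kept (to match A exactly, including its off-by-a-step results), but the O(N) inner cost scan is replaced by a one-time sort with prefix sums so each cost query is answered by an O(log N) binary search and a closed-form expression.
import Mathlib
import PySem

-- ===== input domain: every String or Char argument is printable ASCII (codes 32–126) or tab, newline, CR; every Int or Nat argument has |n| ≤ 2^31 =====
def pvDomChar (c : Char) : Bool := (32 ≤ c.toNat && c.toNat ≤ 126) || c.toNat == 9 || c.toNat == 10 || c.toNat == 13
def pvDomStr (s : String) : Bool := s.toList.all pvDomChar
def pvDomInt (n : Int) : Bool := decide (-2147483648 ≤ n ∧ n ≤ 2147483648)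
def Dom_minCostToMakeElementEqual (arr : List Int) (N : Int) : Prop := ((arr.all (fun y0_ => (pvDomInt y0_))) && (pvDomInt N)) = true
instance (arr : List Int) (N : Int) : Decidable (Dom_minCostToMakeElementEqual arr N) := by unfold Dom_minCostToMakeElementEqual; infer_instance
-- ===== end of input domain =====

-- B keeps A's ternary search over the value range but answers each cost query from a
-- sorted copy + prefix sums via binary search instead of an O(N) scan (measured faster).


-- ===== PORT A =====
def computeCost (arr : List Int) (N X : Int) : Int :=
  (PySem.List.pyRange 0 N 1).foldl (fun cost i => cost + |PySem.List.pyGetD arr i 0 - X|) 0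

-- fuel = interval width, always sufficient: the loop shrinks high - low by ≥ 1 per step
def ternaryA (arr : List Int) (N : Int) : Nat → Int → Int → Int
  | 0, low, high => computeCost arr N (PySem.Int.floordiv (low + high) 2)
  | fuel + 1, low, high =>
    if high - low > 2 then
      let mid1 := low + PySem.Int.floordiv (high - low) 3
      let mid2 := high - PySem.Int.floordiv (high - low) 3
      let cost1 := computeCost arr N mid1
      let cost2 := computeCost arr N mid2
      if cost1 < cost2 then ternaryA arr N fuel low mid2
      else ternaryA arr N fuel mid1 high
    else computeCost arr N (PySem.Int.floordiv (low + high) 2)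

def minCostToMakeElementEqual (arr : List Int) (N : Int) : Int :=
  let a0 := PySem.List.pyGetD arr 0 0
  let lh := (PySem.List.pyRange 0 N 1).foldl
      (fun (lh : Int × Int) i =>
        (if lh.1 > PySem.List.pyGetD arr i 0 then PySem.List.pyGetD arr i 0 else lh.1,
         if lh.2 < PySem.List.pyGetD arr i 0 then PySem.List.pyGetD arr i 0 else lh.2))
      (a0, a0)
  ternaryA arr N (lh.2 - lh.1).toNat lh.1 lh.2

-- ===== PORT B =====
-- the hand-written bisect_left while-loop of Source B
def bisLoop (xs : List Int) (X : Int) : Nat → Int → Int → Int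
  | 0, lo, _ => lo
  | fuel + 1, lo, hi =>
    if lo < hi then
      let m := PySem.Int.floordiv (lo + hi) 2
      if PySem.List.pyGetD xs m 0 < X then bisLoop xs X fuel (m + 1) hi
      else bisLoop xs X fuel lo m
    else lo

def costB (xs pref : List Int) (N total X : Int) : Int :=
  let k := bisLoop xs X N.toNat 0 N
  X * (2 * k - N) + total - 2 * PySem.List.pyGetD pref k 0

def ternaryB (xs pref : List Int) (N total : Int) : Nat → Int → Int → Int
  | 0, low, high => costB xs pref N total (PySem.Int.floordiv (low + high) 2)
  | fuel + 1, low, high =>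
    if high - low > 2 then
      let mid1 := low + PySem.Int.floordiv (high - low) 3
      let mid2 := high - PySem.Int.floordiv (high - low) 3
      let c1 := costB xs pref N total mid1
      let c2 := costB xs pref N total mid2
      if c1 < c2 then ternaryB xs pref N total fuel low mid2
      else ternaryB xs pref N total fuel mid1 high
    else costB xs pref N total (PySem.Int.floordiv (low + high) 2)

def minCostToMakeElementEqual_alt (arr : List Int) (N : Int) : Int :=
  if N ≤ 0 then 0
  else
    let xs := PySem.List.sorted (PySem.List.slice arr none (some N)) (fun v => v) false
    let ps := xs.foldl (fun (p : List Int × Int) v => (p.1 ++ [p.2 + v], p.2 + v)) ([0], 0)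
    let pref := ps.1
    let total := PySem.List.pyGetD pref N 0
    let low := PySem.List.pyGetD xs 0 0
    let high := PySem.List.pyGetD xs (-1) 0
    ternaryB xs pref N total (high - low).toNat low high

-- ===== PRECONDITION & SPEC =====
-- Pre_ excludes exactly the inputs where A raises IndexError: empty arr (arr[0]) and N > len(arr).
def Pre_minCostToMakeElementEqual (arr : List Int) (N : Int) : Prop :=
  arr ≠ [] ∧ N ≤ (arr.length : Int)
instance (arr : List Int) (N : Int) : Decidable (Pre_minCostToMakeElementEqual arr N) := by
  unfold Pre_minCostToMakeElementEqual; infer_instance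

def pvWitness_minCostToMakeElementEqual : List Int × Int := ([4, -6, 4, 1], 4)

def Spec_minCostToMakeElementEqual (arr : List Int) (N : Int) (out : Int) : Prop := out = minCostToMakeElementEqual_alt arr N
instance (arr : List Int) (N : Int) (out : Int) : Decidable (Spec_minCostToMakeElementEqual arr N out) := by unfold Spec_minCostToMakeElementEqual; infer_instance

-- ===== CLAIM (what is proved, stated in full; the proofs are below) =====
def Claim_equal_minCostToMakeElementEqual : Prop := ∀ (arr : List Int) (N : Int), Dom_minCostToMakeElementEqual arr N → Pre_minCostToMakeElementEqual arr N → Spec_minCostToMakeElementEqual arr N (minCostToMakeElementEqual arr N)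

-- ===== LEMMAS AND PROOFS =====

theorem foldl_range_take {α β : Type} (arr : List α) (N : Int) (d : α) (f : β → α → β) (init : β)
    (h0 : 0 ≤ N) (h1 : N ≤ (arr.length : Int)) :
    (PySem.List.pyRange 0 N 1).foldl (fun acc i => f acc (PySem.List.pyGetD arr i d)) init
      = (arr.take N.toNat).foldl f init := by
  set l := arr.take N.toNat with hl
  have hc : (PySem.List.pyRange 0 N 1).foldl (fun acc i => f acc (PySem.List.pyGetD arr i d)) init
      = (PySem.List.pyRange 0 N 1).foldl (fun acc i => f acc (PySem.List.pyGetD l i d)) init := by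
    apply PySem.List.foldl_congr_mem
    intro acc x hx
    rw [PySem.List.mem_pyRange_one] at hx
    rw [PySem.List.pyGetD_eq_getElem arr d hx.1 (by omega),
        PySem.List.pyGetD_eq_getElem l d hx.1
          (by rw [hl]; simp [List.length_take]; omega)]
    simp only [hl, List.getElem_take]
  rw [hc]
  have hlen : N = PySem.List.len l := by
    show N = ((l.length : Nat) : Int)
    rw [hl]; simp [List.length_take]; omega
  rw [hlen]
  simpa using PySem.List.foldl_pyRange_pyGetD l d f init (le_refl 0)

-- the running min/max update of A, as a named step function (defeq to the port's inline lambda)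
def mmStep (lh : Int × Int) (v : Int) : Int × Int :=
  (if lh.1 > v then v else lh.1, if lh.2 < v then v else lh.2)

theorem computeCost_take (arr : List Int) (N X : Int) (h0 : 0 ≤ N) (h1 : N ≤ (arr.length : Int)) :
    computeCost arr N X = ((arr.take N.toNat).map (fun v => |v - X|)).sum := by
  unfold computeCost
  rw [foldl_range_take arr N 0 (fun c v => c + |v - X|) 0 h0 h1, PySem.List.foldl_add]
  simp

-- pair fold = (fold min, fold max)
theorem foldl_minmax (l : List Int) : ∀ (a b : Int),
    l.foldl mmStep (a, b) = (l.foldl min a, l.foldl max b) := by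
  induction l with
  | nil => intro a b; simp
  | cons v t ih =>
    intro a b
    simp only [List.foldl_cons, mmStep]
    rw [show (if a > v then v else a) = min a v by split_ifs <;> omega,
        show (if b < v then v else b) = max b v by split_ifs <;> omega]
    exact ih (min a v) (max b v)

theorem pairwise_le_getLast (xs : List Int) (hp : List.Pairwise (· ≤ ·) xs)
    (hx : xs ≠ []) : ∀ y ∈ xs, y ≤ xs.getLast hx := by
  induction xs with
  | nil => simp at hx
  | cons x t ih =>
    intro y hy
    cases t with
    | nil => simp at hy; simp [hy]
    | cons x2 t2 =>
      rw [List.getLast_cons (by simp)]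
      rcases List.mem_cons.mp hy with rfl | hy2
      · exact List.rel_of_pairwise_cons hp (List.getLast_mem _)
      · exact ih hp.of_cons (by simp) y hy2

-- the prefix-sum building loop of Source B
theorem foldl_pref (ys : List Int) : ∀ (p0 : List Int) (s0 : Int),
    (ys.foldl (fun (p : List Int × Int) v => (p.1 ++ [p.2 + v], p.2 + v)) (p0, s0))
      = (p0 ++ (List.range ys.length).map (fun k => s0 + (ys.take (k+1)).sum), s0 + ys.sum) := by
  induction ys with
  | nil => intro p0 s0; simp
  | cons v t ih =>
    intro p0 s0
    simp only [List.foldl_cons]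
    rw [ih (p0 ++ [s0 + v]) (s0 + v)]
    refine Prod.ext ?_ (by simp [add_assoc])
    show p0 ++ [s0 + v] ++ _ = p0 ++ _
    rw [List.length_cons, List.range_succ_eq_map]
    simp only [List.map_cons, List.map_map]
    simp [Function.comp_def, add_assoc]

theorem pref_get (xs : List Int) (j : Nat) (hj : j ≤ xs.length) :
    PySem.List.pyGetD
      ((xs.foldl (fun (p : List Int × Int) v => (p.1 ++ [p.2 + v], p.2 + v)) ([0], 0)).1)
      (j : Int) 0 = (xs.take j).sum := by
  rw [foldl_pref]
  rw [show ((j : Nat) : Int) = ((j : Nat) : Int) from rfl, PySem.List.pyGetD_natCast]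
  cases j with
  | zero => simp
  | succ k =>
    have hk : k < xs.length := by omega
    simp only [List.singleton_append, List.getD]
    rw [List.getElem?_cons_succ]
    rw [List.getElem?_map, List.getElem?_range hk]
    simp

theorem bisLoop_spec (xs : List Int) (X : Int)
    (hs : List.Pairwise (· ≤ ·) xs) :
    ∀ (fuel : Nat) (lo hi : Int), (hi - lo).toNat ≤ fuel →
    0 ≤ lo → lo ≤ hi → hi ≤ (xs.length : Int) →
    (∀ (j : Nat) (hj : j < xs.length), (j : Int) < lo → xs[j] < X) →
    (∀ (j : Nat) (hj : j < xs.length), hi ≤ (j : Int) → X ≤ xs[j]) →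
    lo ≤ bisLoop xs X fuel lo hi ∧ bisLoop xs X fuel lo hi ≤ hi ∧
    (∀ (j : Nat) (hj : j < xs.length), (j : Int) < bisLoop xs X fuel lo hi → xs[j] < X) ∧
    (∀ (j : Nat) (hj : j < xs.length), bisLoop xs X fuel lo hi ≤ (j : Int) → X ≤ xs[j]) := by
  intro fuel
  induction fuel with
  | zero =>
    intro lo hi hf h0 hlh hhi hlow hhigh
    have : lo = hi := by omega
    subst this
    exact ⟨le_refl _, le_refl _, hlow, hhigh⟩
  | succ f ih =>
    intro lo hi hf h0 hlh hhi hlow hhigh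
    simp only [bisLoop]
    by_cases hlt : lo < hi
    · simp only [hlt, if_true]
      have hm : PySem.Int.floordiv (lo + hi) 2 = (lo + hi) / 2 :=
        PySem.Int.floordiv_eq_ediv_of_pos (by omega)
      set m := PySem.Int.floordiv (lo + hi) 2 with hmdef
      have hm1 : lo ≤ m := by omega
      have hm2 : m < hi := by omega
      have hmlen : m < (xs.length : Int) := by omega
      have hget : PySem.List.pyGetD xs m 0 = xs[m.toNat]'(by omega) :=
        PySem.List.pyGetD_eq_getElem xs 0 (by omega) hmlen
      have hmono : ∀ (i j : Nat) (hi' : i < xs.length) (hj' : j < xs.length),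
          i ≤ j → xs[i] ≤ xs[j] := by
        intro i j hi' hj' hij
        rcases Nat.lt_or_ge i j with h | h
        · exact (List.pairwise_iff_getElem.mp hs) i j hi' hj' h
        · have : i = j := by omega
          subst this; exact le_refl _
      by_cases hcmp : PySem.List.pyGetD xs m 0 < X
      · simp only [hcmp, if_true]
        have := ih (m + 1) hi (by omega) (by omega) (by omega) hhi
          (fun j hj hjm => by
            have : xs[j] ≤ xs[m.toNat]'(by omega) := hmono j m.toNat hj (by omega) (by omega)
            rw [hget] at hcmp; omega)
          hhigh
        exact ⟨by omega, this.2.1, this.2.2.1, this.2.2.2⟩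
      · simp only [hcmp, if_false]
        have hXm : X ≤ xs[m.toNat]'(by omega) := by rw [hget] at hcmp; omega
        have := ih lo m (by omega) (by omega) (by omega) (by omega) hlow
          (fun j hj hjm => by
            have : xs[m.toNat]'(by omega) ≤ xs[j] := hmono m.toNat j (by omega) hj (by omega)
            omega)
        exact ⟨this.1, by omega, this.2.2.1, this.2.2.2⟩
    · simp only [hlt, if_false]
      exact ⟨le_refl _, by omega, hlow, fun j hj hjl => hhigh j hj (by omega)⟩

theorem sum_map_sub_left (t : List Int) (X : Int) :
    (t.map (fun v => X - v)).sum = (t.length : Int) * X - t.sum := by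
  induction t with
  | nil => simp
  | cons v t ih => simp [ih]; ring

theorem sum_map_sub_right (t : List Int) (X : Int) :
    (t.map (fun v => v - X)).sum = t.sum - (t.length : Int) * X := by
  induction t with
  | nil => simp
  | cons v t ih => simp [ih]; ring

theorem costB_eq (xs : List Int) (hs : List.Pairwise (· ≤ ·) xs) (N : Int)
    (hlen : (xs.length : Int) = N) (X : Int) :
    costB xs ((xs.foldl (fun (p : List Int × Int) v => (p.1 ++ [p.2 + v], p.2 + v)) ([0], 0)).1)
      N (PySem.List.pyGetD ((xs.foldl (fun (p : List Int × Int) v => (p.1 ++ [p.2 + v], p.2 + v)) ([0], 0)).1) N 0) X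
      = (xs.map (fun v => |v - X|)).sum := by
  have hN0 : 0 ≤ N := by omega
  set pref := (xs.foldl (fun (p : List Int × Int) v => (p.1 ++ [p.2 + v], p.2 + v)) ([0], 0)).1 with hpref
  have htotal : PySem.List.pyGetD pref N 0 = xs.sum := by
    rw [hpref, show N = ((N.toNat : Nat) : Int) by omega, pref_get xs N.toNat (by omega)]
    rw [List.take_of_length_le (by omega)]
  have hspec := bisLoop_spec xs X hs N.toNat 0 N (by omega) (le_refl _) hN0 (by omega)
    (by intro j hj hj0; omega)
    (by intro j hj hjN; exfalso; omega)
  set k := bisLoop xs X N.toNat 0 N with hk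
  have hk0 : 0 ≤ k := hspec.1
  have hkN : k ≤ N := hspec.2.1
  set K := k.toNat with hK
  have hkK : k = (K : Int) := by omega
  have hKlen : K ≤ xs.length := by omega
  have hprefk : PySem.List.pyGetD pref k 0 = (xs.take K).sum := by
    rw [hpref, hkK, pref_get xs K hKlen]
  -- split the sum at K
  have hsplit : (xs.map (fun v => |v - X|)).sum
      = ((xs.take K).map (fun v => |v - X|)).sum + ((xs.drop K).map (fun v => |v - X|)).sum := by
    conv_lhs => rw [← List.take_append_drop K xs]
    rw [List.map_append, List.sum_append]
  have hlow : ∀ v ∈ xs.take K, |v - X| = X - v := by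
    intro v hv
    rw [List.mem_take_iff_getElem] at hv
    obtain ⟨i, hi, rfl⟩ := hv
    have : xs[i] < X := hspec.2.2.1 i (by omega) (by omega)
    rw [abs_of_nonpos (by omega)]; ring
  have hhigh : ∀ v ∈ xs.drop K, |v - X| = v - X := by
    intro v hv
    rw [List.mem_drop_iff_getElem] at hv
    obtain ⟨i, hi, rfl⟩ := hv
    have : X ≤ xs[K + i] := hspec.2.2.2 (K + i) (by omega) (by omega)
    rw [abs_of_nonneg (by omega)]
  have hsum_low : ((xs.take K).map (fun v => |v - X|)).sum
      = (K : Int) * X - (xs.take K).sum := by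
    rw [List.map_congr_left hlow, sum_map_sub_left]
    rw [List.length_take_of_le hKlen]
  have hsum_high : ((xs.drop K).map (fun v => |v - X|)).sum
      = (xs.drop K).sum - ((xs.length : Int) - (K : Int)) * X := by
    rw [List.map_congr_left hhigh, sum_map_sub_right]
    rw [List.length_drop]
    push_cast [Nat.cast_sub hKlen]
    ring
  have htd : (xs.take K).sum + (xs.drop K).sum = xs.sum := List.sum_take_add_sum_drop xs K
  show X * (2 * k - N) + PySem.List.pyGetD pref N 0 - 2 * PySem.List.pyGetD pref k 0 = _
  rw [htotal, hprefk, hsplit, hsum_low, hsum_high, hkK, ← htd, hlen]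
  ring

theorem tern_congr (arr xs pref : List Int) (N total : Int)
    (hc : ∀ X, computeCost arr N X = costB xs pref N total X) :
    ∀ (fuel : Nat) (low high : Int),
      ternaryA arr N fuel low high = ternaryB xs pref N total fuel low high := by
  intro fuel
  induction fuel with
  | zero => intro low high; exact hc _
  | succ f ih =>
    intro low high
    simp only [ternaryA, ternaryB]
    by_cases hgl : high - low > 2
    · simp only [hgl, if_true, hc]
      split_ifs with hcmp
      · exact ih low (high - PySem.Int.floordiv (high - low) 3)
      · exact ih (low + PySem.Int.floordiv (high - low) 3) high
    · simp only [hgl, if_false, hc]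

theorem computeCost_trivial (arr : List Int) (N X : Int) (hN : N ≤ 0) :
    computeCost arr N X = 0 := by
  unfold computeCost
  rw [PySem.List.pyRange_one]
  have : (N - 0).toNat = 0 := by omega
  rw [this]
  simp

-- ===== VERDICT (by name: the statement is the Claim_ definition above) =====
theorem minCostToMakeElementEqual_spec : Claim_equal_minCostToMakeElementEqual := by
  intro arr N _hdom hpre
  obtain ⟨hne, hNle⟩ := hpre
  unfold Spec_minCostToMakeElementEqual
  by_cases hN : N ≤ 0
  · -- empty range: A computes cost over no elements, B returns 0
    unfold minCostToMakeElementEqual minCostToMakeElementEqual_alt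
    simp only [hN, if_true]
    have hr : PySem.List.pyRange 0 N 1 = [] := by
      rw [PySem.List.pyRange_one]
      have : (N - 0).toNat = 0 := by omega
      rw [this]; simp
    rw [hr]
    simp only [List.foldl_nil]
    show ternaryA arr N (PySem.List.pyGetD arr 0 0 - PySem.List.pyGetD arr 0 0).toNat _ _ = 0
    rw [sub_self]
    exact computeCost_trivial arr N _ hN
  · have hN1 : 0 < N := by omega
    set l := arr.take N.toNat with hl
    have harrlen : 0 < arr.length := List.length_pos_of_ne_nil hne
    have hlne : l ≠ [] := by
      intro h
      have h0 : min N.toNat arr.length = 0 := by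
        simpa [hl, List.length_take] using congrArg List.length h
      omega
    have hllen : (l.length : Int) = N := by
      rw [hl, List.length_take]; omega
    set xs := PySem.List.sorted l (fun v => v) false with hxs
    have hperm : xs.Perm l := PySem.List.sorted_perm l (fun v => v) false
    have hxlen : (xs.length : Int) = N := by
      rw [hxs, PySem.List.length_sorted]; exact hllen
    have hxne : xs ≠ [] := by
      intro h; rw [hxs] at h
      rw [PySem.List.sorted_eq_nil_iff] at h; exact hlne h
    have hsorted : List.Pairwise (· ≤ ·) xs := by
      rw [hxs]; exact PySem.List.sorted_pairwise l (fun v => v)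
    have hslice : PySem.List.slice arr none (some N) = l :=
      PySem.List.slice_to arr (by omega)
    -- both sides, zeta/beta-reduced (definitionally equal to the unfolded ports)
    show ternaryA arr N
        (((PySem.List.pyRange 0 N 1).foldl
            (fun acc i => mmStep acc (PySem.List.pyGetD arr i 0))
            (PySem.List.pyGetD arr 0 0, PySem.List.pyGetD arr 0 0)).2
         - ((PySem.List.pyRange 0 N 1).foldl
            (fun acc i => mmStep acc (PySem.List.pyGetD arr i 0))
            (PySem.List.pyGetD arr 0 0, PySem.List.pyGetD arr 0 0)).1).toNat
        ((PySem.List.pyRange 0 N 1).foldl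
          (fun acc i => mmStep acc (PySem.List.pyGetD arr i 0))
          (PySem.List.pyGetD arr 0 0, PySem.List.pyGetD arr 0 0)).1
        ((PySem.List.pyRange 0 N 1).foldl
          (fun acc i => mmStep acc (PySem.List.pyGetD arr i 0))
          (PySem.List.pyGetD arr 0 0, PySem.List.pyGetD arr 0 0)).2
      = minCostToMakeElementEqual_alt arr N
    unfold minCostToMakeElementEqual_alt
    simp only [hN, if_false]
    rw [hslice, ← hxs]
    rw [foldl_range_take arr N 0 mmStep
      (PySem.List.pyGetD arr 0 0, PySem.List.pyGetD arr 0 0) (by omega) hNle, ← hl]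
    rw [foldl_minmax l (PySem.List.pyGetD arr 0 0) (PySem.List.pyGetD arr 0 0)]
    -- initial bounds agree
    obtain ⟨m, t, hmt⟩ := List.exists_cons_of_ne_nil hxne
    have hs2 : PySem.List.sorted l (fun v => v) false = m :: t := by rw [← hxs]; exact hmt
    have hmle : ∀ y ∈ l, m ≤ y := PySem.List.key_head_sorted_le l (fun v => v) hs2
    have hm_mem : m ∈ l := by
      rw [← PySem.List.mem_sorted l (fun v => v) false, ← hxs, hmt]; simp
    have ha0mem : PySem.List.pyGetD arr 0 0 ∈ l := by
      rw [PySem.List.pyGetD_eq_getElem arr 0 (le_refl 0) (by omega)]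
      have hg : arr[(0 : Int).toNat]'(by simpa using harrlen)
          = l[0]'(by have := hllen; omega) := by
        simp [hl, List.getElem_take]
      rw [hg]
      exact List.getElem_mem _
    have hxm : PySem.List.pyGetD xs 0 0 = m := by
      rw [hmt]; exact PySem.List.pyGetD_zero_cons m t 0
    have hgl_mem : xs.getLast hxne ∈ l := by
      rw [← PySem.List.mem_sorted l (fun v => v) false, ← hxs]
      exact List.getLast_mem hxne
    have hgl_max : ∀ y ∈ l, y ≤ xs.getLast hxne := by
      intro y hy
      have hyx : y ∈ xs := by rw [hxs, PySem.List.mem_sorted]; exact hy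
      exact pairwise_le_getLast xs hsorted hxne y hyx
    have hlow : l.foldl min (PySem.List.pyGetD arr 0 0) = PySem.List.pyGetD xs 0 0 := by
      rw [hxm]
      refine le_antisymm ((PySem.List.foldl_min_le l _).2 m hm_mem) ?_
      rcases PySem.List.foldl_min_mem l (PySem.List.pyGetD arr 0 0) with h | h
      · rw [h]; exact hmle _ ha0mem
      · exact hmle _ h
    have hhigh : l.foldl max (PySem.List.pyGetD arr 0 0) = PySem.List.pyGetD xs (-1) 0 := by
      rw [PySem.List.pyGetD_neg_one xs 0 hxne]
      refine le_antisymm ?_ ((PySem.List.le_foldl_max l _).2 _ hgl_mem)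
      rcases PySem.List.foldl_max_mem l (PySem.List.pyGetD arr 0 0) with h | h
      · rw [h]; exact hgl_max _ ha0mem
      · exact hgl_max _ h
    rw [hlow, hhigh]
    -- costs agree, so the two ternary searches agree
    apply tern_congr arr xs _ N _ ?_ (PySem.List.pyGetD xs (-1) 0 - PySem.List.pyGetD xs 0 0).toNat
    intro X
    rw [computeCost_take arr N X (by omega) hNle, ← hl]
    rw [costB_eq xs hsorted N hxlen X]
    have : (xs.map (fun v => |v - X|)).Perm (l.map (fun v => |v - X|)) := hperm.map _
    exact (this.sum_eq).symm
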